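-- pv_equiv track=rewrite | github.com/kbricheno/VTM-Roller | diceHandling.py | evaluate_dice
-- ===== SOURCE A (Python) =====
-- def evaluate_dice(normalDiceList, hungerDiceList):
--     resultTypes = {"successes": 0, "hungerSuccesses": 0,
--                    "crits": 0, "messyCrits": 0,
--                    "failures": 0, "hungerFailures": 0, "bestialFailures": 0}
--
--     for result in normalDiceList:
--         if result == 10:
--             resultTypes["crits"] += 1
--         elif result >= 6:
--             resultTypes["successes"] += 1
--         else:
--             resultTypes["failures"] += 1
--
--     for result in hungerDiceList:
--         if result == 10:
--             resultTypes["messyCrits"] += 1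
--         elif result >= 6:
--             resultTypes["hungerSuccesses"] += 1
--         elif result == 1:
--             resultTypes["bestialFailures"] += 1
--         else:
--             resultTypes["hungerFailures"] += 1
--
--     return resultTypes
-- ===== SOURCE B (Python) =====
-- def evaluate_dice(normalDiceList, hungerDiceList):
--     # Closed-form tallies instead of a per-die branch loop updating a dict.
--     n = len(normalDiceList)
--     crits = normalDiceList.count(10)
--     successes = sum(1 for v in normalDiceList if v >= 6) - crits
--     failures = n - crits - successes
--     h = len(hungerDiceList)
--     messyCrits = hungerDiceList.count(10)
--     hungerSuccesses = sum(1 for v in hungerDiceList if v >= 6) - messyCrits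
--     bestialFailures = hungerDiceList.count(1)
--     hungerFailures = h - messyCrits - hungerSuccesses - bestialFailures
--     return {"successes": successes, "hungerSuccesses": hungerSuccesses,
--             "crits": crits, "messyCrits": messyCrits,
--             "failures": failures, "hungerFailures": hungerFailures,
--             "bestialFailures": bestialFailures}
-- ===== Notes on version B (the rewrite author's own statement) =====
-- stated objective: alternative
-- what changed: Replaces the per-die branch loops that increment a dict in place with closed-form tallies (count(10), a >=6 count, count(1), len) from which each bucket is computed arithmetically, the failure buckets as remainders.
import Mathlib
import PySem

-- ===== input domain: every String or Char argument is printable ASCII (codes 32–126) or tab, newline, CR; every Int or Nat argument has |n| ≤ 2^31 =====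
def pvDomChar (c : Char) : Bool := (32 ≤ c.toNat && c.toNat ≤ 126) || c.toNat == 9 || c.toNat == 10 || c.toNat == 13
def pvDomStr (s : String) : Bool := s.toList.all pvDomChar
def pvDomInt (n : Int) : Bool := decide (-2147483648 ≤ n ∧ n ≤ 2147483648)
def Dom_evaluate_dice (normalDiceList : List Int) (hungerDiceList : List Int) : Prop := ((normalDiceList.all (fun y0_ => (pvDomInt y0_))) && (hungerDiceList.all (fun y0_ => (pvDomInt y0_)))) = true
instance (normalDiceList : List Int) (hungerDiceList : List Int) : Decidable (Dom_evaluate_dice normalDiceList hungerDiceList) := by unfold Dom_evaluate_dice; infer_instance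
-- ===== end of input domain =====

-- B computes each bucket from closed-form tallies (count/len/Σ) instead of A's per-die branch loops over a dict.

-- ===== PORT A =====
def evaluate_dice (normalDiceList : List Int) (hungerDiceList : List Int) : List (String × Int) :=
  let resultTypes : PySem.Dict String Int := PySem.Dict.ofList
    [("successes", 0), ("hungerSuccesses", 0), ("crits", 0), ("messyCrits", 0),
     ("failures", 0), ("hungerFailures", 0), ("bestialFailures", 0)]
  let resultTypes := normalDiceList.foldl (fun d result =>
    if result == 10 then d.modify "crits" 0 (· + 1)
    else if result ≥ 6 then d.modify "successes" 0 (· + 1)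
    else d.modify "failures" 0 (· + 1)) resultTypes
  let resultTypes := hungerDiceList.foldl (fun d result =>
    if result == 10 then d.modify "messyCrits" 0 (· + 1)
    else if result ≥ 6 then d.modify "hungerSuccesses" 0 (· + 1)
    else if result == 1 then d.modify "bestialFailures" 0 (· + 1)
    else d.modify "hungerFailures" 0 (· + 1)) resultTypes
  resultTypes.items

-- ===== PORT B =====
def evaluate_dice_alt (normalDiceList : List Int) (hungerDiceList : List Int) : List (String × Int) :=
  let n := PySem.List.len normalDiceList
  let crits : Int := PySem.List.count normalDiceList 10
  let successes := (normalDiceList.map (fun v => if v ≥ 6 then (1 : Int) else 0)).sum - crits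
  let failures := n - crits - successes
  let h := PySem.List.len hungerDiceList
  let messyCrits : Int := PySem.List.count hungerDiceList 10
  let hungerSuccesses := (hungerDiceList.map (fun v => if v ≥ 6 then (1 : Int) else 0)).sum - messyCrits
  let bestialFailures : Int := PySem.List.count hungerDiceList 1
  let hungerFailures := h - messyCrits - hungerSuccesses - bestialFailures
  [("successes", successes), ("hungerSuccesses", hungerSuccesses),
   ("crits", crits), ("messyCrits", messyCrits),
   ("failures", failures), ("hungerFailures", hungerFailures),
   ("bestialFailures", bestialFailures)]

-- ===== PRECONDITION & SPEC =====
def Spec_evaluate_dice (normalDiceList : List Int) (hungerDiceList : List Int) (out : List (String × Int)) : Prop := out = evaluate_dice_alt normalDiceList hungerDiceList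
instance (normalDiceList : List Int) (hungerDiceList : List Int) (out : List (String × Int)) : Decidable (Spec_evaluate_dice normalDiceList hungerDiceList out) := by unfold Spec_evaluate_dice; infer_instance

-- ===== CLAIM (what is proved, stated in full; the proofs are below) =====
def Claim_equal_evaluate_dice : Prop := ∀ (normalDiceList : List Int) (hungerDiceList : List Int), Dom_evaluate_dice normalDiceList hungerDiceList → Spec_evaluate_dice normalDiceList hungerDiceList (evaluate_dice normalDiceList hungerDiceList)

-- ===== LEMMAS AND PROOFS =====

-- the fixed-shape seven-key dict A's loops maintain
def mkD (s hs c mc f hf bf : Int) : PySem.Dict String Int :=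
  PySem.Dict.mk [("successes", s), ("hungerSuccesses", hs), ("crits", c), ("messyCrits", mc),
                 ("failures", f), ("hungerFailures", hf), ("bestialFailures", bf)]

theorem loopN (l : List Int) (s hs c mc f hf bf : Int) :
    l.foldl (fun d result =>
      if result == 10 then d.modify "crits" 0 (· + 1)
      else if result ≥ 6 then d.modify "successes" 0 (· + 1)
      else d.modify "failures" 0 (· + 1)) (mkD s hs c mc f hf bf)
    = mkD (s + ((l.map (fun v => if v ≥ 6 then (1 : Int) else 0)).sum - (PySem.List.count l 10 : Int))) hs
          (c + (PySem.List.count l 10 : Int)) mc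
          (f + (PySem.List.len l - (l.map (fun v => if v ≥ 6 then (1 : Int) else 0)).sum)) hf bf := by
  induction l generalizing s c f with
  | nil => simp [mkD, PySem.List.count_eq, PySem.List.len]
  | cons r l ih =>
    have hstep10 : ∀ s hs c mc f hf bf : Int,
        (mkD s hs c mc f hf bf).modify "crits" 0 (· + 1) = mkD s hs (c + 1) mc f hf bf := fun _ _ _ _ _ _ _ => rfl
    have hstep6 : ∀ s hs c mc f hf bf : Int,
        (mkD s hs c mc f hf bf).modify "successes" 0 (· + 1) = mkD (s + 1) hs c mc f hf bf := fun _ _ _ _ _ _ _ => rfl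
    have hstepf : ∀ s hs c mc f hf bf : Int,
        (mkD s hs c mc f hf bf).modify "failures" 0 (· + 1) = mkD s hs c mc (f + 1) hf bf := fun _ _ _ _ _ _ _ => rfl
    by_cases h10 : r = 10
    · subst h10
      rw [List.foldl_cons, if_pos (by decide : ((10 : Int) == 10) = true), hstep10, ih]
      simp [mkD, PySem.List.count_eq, PySem.List.len]
      omega
    · by_cases h6 : 6 ≤ r
      · rw [List.foldl_cons, if_neg (by simpa using h10), if_pos (by simpa using h6), hstep6, ih]
        simp [mkD, PySem.List.count_eq, PySem.List.len, h6, h10]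
        constructor <;> ring
      · rw [List.foldl_cons, if_neg (by simpa using h10), if_neg (by simpa using h6), hstepf, ih]
        have h10' : r ≠ 10 := h10
        simp [mkD, PySem.List.count_eq, PySem.List.len, h6, h10']
        ring

theorem loopH (l : List Int) (s hs c mc f hf bf : Int) :
    l.foldl (fun d result =>
      if result == 10 then d.modify "messyCrits" 0 (· + 1)
      else if result ≥ 6 then d.modify "hungerSuccesses" 0 (· + 1)
      else if result == 1 then d.modify "bestialFailures" 0 (· + 1)
      else d.modify "hungerFailures" 0 (· + 1)) (mkD s hs c mc f hf bf)
    = mkD s (hs + ((l.map (fun v => if v ≥ 6 then (1 : Int) else 0)).sum - (PySem.List.count l 10 : Int))) c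
          (mc + (PySem.List.count l 10 : Int)) f
          (hf + (PySem.List.len l - (l.map (fun v => if v ≥ 6 then (1 : Int) else 0)).sum - (PySem.List.count l 1 : Int)))
          (bf + (PySem.List.count l 1 : Int)) := by
  induction l generalizing hs mc hf bf with
  | nil => simp [mkD, PySem.List.count_eq, PySem.List.len]
  | cons r l ih =>
    have hstep10 : ∀ s hs c mc f hf bf : Int,
        (mkD s hs c mc f hf bf).modify "messyCrits" 0 (· + 1) = mkD s hs c (mc + 1) f hf bf := fun _ _ _ _ _ _ _ => rfl
    have hstep6 : ∀ s hs c mc f hf bf : Int,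
        (mkD s hs c mc f hf bf).modify "hungerSuccesses" 0 (· + 1) = mkD s (hs + 1) c mc f hf bf := fun _ _ _ _ _ _ _ => rfl
    have hstep1 : ∀ s hs c mc f hf bf : Int,
        (mkD s hs c mc f hf bf).modify "bestialFailures" 0 (· + 1) = mkD s hs c mc f hf (bf + 1) := fun _ _ _ _ _ _ _ => rfl
    have hstepf : ∀ s hs c mc f hf bf : Int,
        (mkD s hs c mc f hf bf).modify "hungerFailures" 0 (· + 1) = mkD s hs c mc f (hf + 1) bf := fun _ _ _ _ _ _ _ => rfl
    by_cases h10 : r = 10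
    · subst h10
      rw [List.foldl_cons, if_pos (by decide : ((10 : Int) == 10) = true), hstep10, ih]
      simp [mkD, PySem.List.count_eq, PySem.List.len]
      omega
    · by_cases h6 : 6 ≤ r
      · have h1 : r ≠ 1 := by omega
        rw [List.foldl_cons, if_neg (by simpa using h10), if_pos (by simpa using h6), hstep6, ih]
        simp [mkD, PySem.List.count_eq, PySem.List.len, h6, h10, h1]
        constructor <;> ring
      · by_cases h1 : r = 1
        · subst h1
          rw [List.foldl_cons, if_neg (by decide), if_neg (by decide), if_pos (by decide : ((1 : Int) == 1) = true), hstep1, ih]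
          simp [mkD, PySem.List.count_eq, PySem.List.len]
          constructor <;> ring
        · rw [List.foldl_cons, if_neg (by simpa using h10), if_neg (by simpa using h6), if_neg (by simpa using h1), hstepf, ih]
          have h10' : r ≠ 10 := h10
          simp [mkD, PySem.List.count_eq, PySem.List.len, h6, h10', h1]
          ring

-- ===== VERDICT (by name: the statement is the Claim_ definition above) =====
theorem evaluate_dice_spec : Claim_equal_evaluate_dice := by
  intro nl hl _
  show evaluate_dice nl hl = evaluate_dice_alt nl hl
  have h0 : (PySem.Dict.ofList
      [("successes", (0 : Int)), ("hungerSuccesses", 0), ("crits", 0), ("messyCrits", 0),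
       ("failures", 0), ("hungerFailures", 0), ("bestialFailures", 0)]) = mkD 0 0 0 0 0 0 0 := rfl
  simp only [evaluate_dice, evaluate_dice_alt, h0, loopN, loopH]
  simp [mkD]
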